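-- pv_equiv track=rewrite | github.com/Alresthyst/resume | TextMining/text_for_LSA_testing.py | translist
-- ===== SOURCE A (Python) =====
-- def translist(nor):
--
--     temp = 0
--     count = 0
--
--     for i in range(len(nor)):
--         for j in range(len(nor[i])):
--             temp = temp + 1
--
--     test_terms = [0 for i in range(temp)]
--
--     for i in range(len(nor)):
--         for j in range(len(nor[i])):
--             test_terms[count] = nor[i][j]
--             count = count + 1
--     return test_terms
-- ===== SOURCE B (Python) =====
-- def translist(nor):
--     # Recursive decomposition: first row concatenated with the flattening of the rest.
--     if not nor:
--         return []
--     return nor[0] + translist(nor[1:])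
-- ===== Notes on version B (the rewrite author's own statement) =====
-- stated objective: simpler
-- what changed: B replaces A's two index-driven nested-loop passes (count then preallocate-and-assign) with structural recursion on the outer list: flatten(nor) = nor[0] + flatten(nor[1:]), no counters, no index arithmetic, no element-level loop.
import Mathlib
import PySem

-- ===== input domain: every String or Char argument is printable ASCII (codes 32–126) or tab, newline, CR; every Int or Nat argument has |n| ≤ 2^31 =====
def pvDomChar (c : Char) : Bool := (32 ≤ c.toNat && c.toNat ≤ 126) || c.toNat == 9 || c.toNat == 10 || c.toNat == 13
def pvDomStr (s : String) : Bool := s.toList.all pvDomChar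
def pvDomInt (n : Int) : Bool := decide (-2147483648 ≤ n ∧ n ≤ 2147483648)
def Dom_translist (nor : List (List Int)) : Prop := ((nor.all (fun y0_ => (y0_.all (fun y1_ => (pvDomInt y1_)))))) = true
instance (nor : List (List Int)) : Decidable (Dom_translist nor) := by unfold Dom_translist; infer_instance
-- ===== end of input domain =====

-- B flattens by structural recursion (first row ++ flatten of the rest), replacing A's two
-- index-driven nested-loop passes (count, then preallocate-and-index-assign); objective: simpler.

-- ===== PORT A =====
-- for i in range(len(nor)): for j in range(len(nor[i])): temp = temp + 1
-- (indices are always in range here; nor[i] / nor[i][j] are ported with getD, exact on in-range indices)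
def translistCount (nor : List (List Int)) : Nat :=
  (List.range nor.length).foldl (fun temp i =>
    (List.range (nor.getD i []).length).foldl (fun t _ => t + 1) temp) 0

-- for i …: for j …: test_terms[count] = nor[i][j]; count = count + 1
-- (list index assignment test_terms[count] = v with 0 ≤ count < len ported as List.set, exact in range)
def translistFill (nor : List (List Int)) (st : List Int × Nat) : List Int × Nat :=
  (List.range nor.length).foldl (fun st i =>
    (List.range (nor.getD i []).length).foldl
      (fun st j => (st.1.set st.2 ((nor.getD i []).getD j 0), st.2 + 1)) st) st

def translist (nor : List (List Int)) : List Int :=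
  (translistFill nor (List.replicate (translistCount nor) 0, 0)).1

-- ===== PORT B =====
-- if not nor: return []; return nor[0] + translist(nor[1:])
def translist_alt : List (List Int) → List Int
  | [] => []
  | r :: rs => r ++ translist_alt rs

-- ===== PRECONDITION & SPEC =====
def Spec_translist (nor : List (List Int)) (out : List Int) : Prop := out = translist_alt nor
instance (nor : List (List Int)) (out : List Int) : Decidable (Spec_translist nor out) := by unfold Spec_translist; infer_instance

-- ===== CLAIM (what is proved, stated in full; the proofs are below) =====
def Claim_equal_translist : Prop := ∀ (nor : List (List Int)), Dom_translist nor → Spec_translist nor (translist nor)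

-- ===== LEMMAS AND PROOFS =====

-- folding over range(len l) with getD-lookups is folding over l
theorem foldl_range_getD {α β : Type} (l : List α) (d : α) (f : β → α → β) (b : β) :
    (List.range l.length).foldl (fun acc i => f acc (l.getD i d)) b = l.foldl f b := by
  induction l generalizing b with
  | nil => simp
  | cons a t ih =>
      rw [List.length_cons, List.range_succ_eq_map]
      simp only [List.foldl_cons, List.foldl_map, List.getD_cons_zero, List.getD_cons_succ]
      exact ih (f b a)

theorem count_eq (nor : List (List Int)) :
    translistCount nor = (nor.map List.length).sum := by
  unfold translistCount
  rw [foldl_range_getD nor [] (fun temp row => (List.range row.length).foldl (fun t _ => t + 1) temp) 0]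
  have inner : ∀ (row : List Int) (t : Nat),
      (List.range row.length).foldl (fun t _ => t + 1) t = t + row.length := by
    intro row t
    induction row generalizing t with
    | nil => simp
    | cons a r ih =>
        rw [List.length_cons, List.range_succ_eq_map]
        simp only [List.foldl_cons, List.foldl_map]
        rw [ih]; omega
  have gen : ∀ (rows : List (List Int)) (t : Nat),
      rows.foldl (fun temp row => (List.range row.length).foldl (fun t _ => t + 1) temp) t
        = t + (rows.map List.length).sum := by
    intro rows
    induction rows with
    | nil => simp
    | cons r rs ih => intro t; simp only [List.foldl_cons, List.map_cons, List.sum_cons]; rw [inner, ih]; omega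
  simpa using gen nor 0

theorem set_append_len (acc : List Int) (y x : Int) (rest : List Int) :
    (acc ++ y :: rest).set acc.length x = acc ++ x :: rest := by
  induction acc with
  | nil => simp
  | cons a t ih => simp [ih]

theorem fill_inner (row acc rest : List Int) :
    row.foldl (fun (st : List Int × Nat) x => (st.1.set st.2 x, st.2 + 1))
      (acc ++ List.replicate row.length 0 ++ rest, acc.length)
      = (acc ++ row ++ rest, acc.length + row.length) := by
  induction row generalizing acc with
  | nil => simp
  | cons a r ih =>
      simp only [List.foldl_cons, List.length_cons, List.replicate_succ]
      have h1 : (acc ++ (0 :: List.replicate r.length 0) ++ rest).set acc.length a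
          = (acc ++ [a]) ++ List.replicate r.length 0 ++ rest := by
        have := set_append_len acc 0 a (List.replicate r.length 0 ++ rest)
        simpa using this
      rw [h1]
      have h2 := ih (acc ++ [a])
      simp only [List.length_append, List.length_cons, List.length_nil] at h2 ⊢
      rw [h2]; simp; omega

theorem fill_eq (rows : List (List Int)) (acc : List Int) :
    rows.foldl (fun (st : List Int × Nat) row =>
        row.foldl (fun st x => (st.1.set st.2 x, st.2 + 1)) st)
      (acc ++ List.replicate ((rows.map List.length).sum) 0, acc.length)
      = (acc ++ rows.flatten, acc.length + (rows.map List.length).sum) := by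
  induction rows generalizing acc with
  | nil => simp
  | cons r rs ih =>
      simp only [List.foldl_cons, List.map_cons, List.sum_cons, List.flatten_cons]
      have hrep : List.replicate (r.length + (rs.map List.length).sum) 0
          = List.replicate r.length 0 ++ List.replicate ((rs.map List.length).sum) (0 : Int) := by
        rw [List.replicate_add]
      rw [hrep, ← List.append_assoc]
      have h1 := fill_inner r acc (List.replicate ((rs.map List.length).sum) 0)
      rw [h1]
      have h2 := ih (acc ++ r)
      simp only [List.length_append] at h2 ⊢
      rw [h2]; simp; omega

theorem translist_eq_flatten (nor : List (List Int)) : translist nor = nor.flatten := by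
  unfold translist translistFill
  rw [count_eq]
  rw [foldl_range_getD nor [] (fun (st : List Int × Nat) row =>
    (List.range row.length).foldl (fun st j => (st.1.set st.2 (row.getD j 0), st.2 + 1)) st)]
  have hf : (fun (st : List Int × Nat) (row : List Int) =>
      (List.range row.length).foldl (fun st j => (st.1.set st.2 (row.getD j 0), st.2 + 1)) st)
      = (fun (st : List Int × Nat) (row : List Int) =>
      row.foldl (fun st x => (st.1.set st.2 x, st.2 + 1)) st) := by
    funext st row
    exact foldl_range_getD row 0 (fun (st : List Int × Nat) x => (st.1.set st.2 x, st.2 + 1)) st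
  rw [hf]
  have := fill_eq nor []
  simpa using congrArg Prod.fst this

theorem translist_alt_eq_flatten (nor : List (List Int)) : translist_alt nor = nor.flatten := by
  induction nor with
  | nil => rfl
  | cons r rs ih => simp [translist_alt, ih]

-- ===== VERDICT (by name: the statement is the Claim_ definition above) =====
theorem translist_spec : Claim_equal_translist := by
  intro nor _
  unfold Spec_translist
  rw [translist_eq_flatten, translist_alt_eq_flatten]
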